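-- pv_equiv track=rewrite | github.com/gjbm2/dagnet | bayes/compiler/slices.py | context_key
-- ===== SOURCE A (Python) =====
-- def context_key(slice_dsl: str) -> str:
--     """Extract the context portion of a sliceDSL, stripping temporal qualifiers.
--
--     Examples:
--         "context(channel:google).window(6-Sep-25:16-Mar-26)"
--             → "context(channel:google)"
--         "context(channel:google).context(device:mobile).cohort(...)"
--             → "context(channel:google).context(device:mobile)"
--         "window(6-Sep-25:16-Mar-26)"
--             → ""  (empty = aggregate/unsliced)
--         "visited(classic-cart).window(...)"
--             → "visited(classic-cart)"
--     """
--     if not slice_dsl: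
--         return ""
--
--     # Split into dot-separated parts, keep non-temporal ones
--     parts = []
--     for part in _split_dsl_parts(slice_dsl):
--         lower = part.strip().lower()
--         if lower.startswith(("window(", "cohort(", "asat(")):
--             continue
--         parts.append(part.strip())
--
--     return ".".join(parts)
--
-- def _split_dsl_parts(dsl: str) -> list[str]:
--     """Split a sliceDSL string on dots, respecting parenthesised content.
--
--     "context(channel:google).window(6-Sep-25:16-Mar-26)" → ["context(channel:google)", "window(6-Sep-25:16-Mar-26)"]
--     """
--     parts = []
--     depth = 0
--     current = []
--     for ch in dsl:
--         if ch == '(':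
--             depth += 1
--             current.append(ch)
--         elif ch == ')':
--             depth -= 1
--             current.append(ch)
--         elif ch == '.' and depth == 0:
--             if current:
--                 parts.append(''.join(current))
--             current = []
--         else:
--             current.append(ch)
--     if current:
--         parts.append(''.join(current))
--     return parts
-- ===== SOURCE B (Python) =====
-- def context_key(slice_dsl: str) -> str:
--     """Extract the context portion of a sliceDSL, stripping temporal qualifiers.
--
--     Index-based: one pass records the positions of top-level dots, then the
--     segments are cut out of the string by slicing between consecutive cut
--     points; empty segments are dropped and temporal ones filtered inline.
--     """
--     if not slice_dsl:
--         return ""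
--     cuts = [-1]
--     depth = 0
--     for i, ch in enumerate(slice_dsl):
--         if ch == '(':
--             depth += 1
--         elif ch == ')':
--             depth -= 1
--         elif ch == '.' and depth == 0:
--             cuts.append(i)
--     cuts.append(len(slice_dsl))
--     kept = []
--     for a, b in zip(cuts, cuts[1:]):
--         seg = slice_dsl[a + 1:b]
--         if not seg:
--             continue
--         t = seg.strip()
--         if not t.lower().startswith(("window(", "cohort(", "asat(")):
--             kept.append(t)
--     return ".".join(kept)
-- ===== Notes on version B (the rewrite author's own statement) =====
-- stated objective: alternative
-- what changed: Replaces the split-into-buffers helper plus separate filter loop (character accumulator lists joined into parts, then re-scanned) with a position-based scheme: one pass records the indices of top-level dots, segments are then sliced directly out of the string between consecutive cut points and filtered/stripped inline while joining.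
import Mathlib
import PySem

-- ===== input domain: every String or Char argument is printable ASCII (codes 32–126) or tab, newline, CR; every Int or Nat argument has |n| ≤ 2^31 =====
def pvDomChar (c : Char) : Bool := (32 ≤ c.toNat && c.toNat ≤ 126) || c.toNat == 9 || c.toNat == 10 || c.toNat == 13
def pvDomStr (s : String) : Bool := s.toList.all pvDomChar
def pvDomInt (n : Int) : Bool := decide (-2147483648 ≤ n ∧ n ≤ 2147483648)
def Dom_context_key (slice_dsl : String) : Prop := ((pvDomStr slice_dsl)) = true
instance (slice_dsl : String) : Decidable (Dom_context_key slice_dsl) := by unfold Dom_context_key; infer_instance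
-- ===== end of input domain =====

-- B replaces A's split-into-character-buffers helper plus separate filter loop by a
-- position-based scheme (record top-level dot indices, slice between cut points,
-- filter inline); objective: alternative (same O(n) cost, different structure).

-- ===== PORT A =====
-- shared transliteration of Python's  s.startswith(("window(", "cohort(", "asat("))  tuple test
def pvIsTemporal (lower : String) : Bool :=
  PySem.Str.startswith lower "window(" || PySem.Str.startswith lower "cohort(" ||
    PySem.Str.startswith lower "asat("

-- one iteration of the  for ch in dsl  loop of _split_dsl_parts; state = (parts, depth, current)
def pvSplitStep (st : List String × Int × List Char) (ch : Char) : List String × Int × List Char :=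
  if ch = '(' then (st.1, st.2.1 + 1, st.2.2 ++ [ch])
  else if ch = ')' then (st.1, st.2.1 - 1, st.2.2 ++ [ch])
  else if ch = '.' ∧ st.2.1 = 0 then
    (if st.2.2 ≠ [] then st.1 ++ [String.ofList st.2.2] else st.1, st.2.1, [])
  else (st.1, st.2.1, st.2.2 ++ [ch])

def pvSplitDslParts (dsl : String) : List String :=
  let st := dsl.toList.foldl pvSplitStep ([], 0, [])
  if st.2.2 ≠ [] then st.1 ++ [String.ofList st.2.2] else st.1

def context_key (slice_dsl : String) : String :=
  if slice_dsl.toList = [] then "" else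
    let parts := (pvSplitDslParts slice_dsl).foldl (fun acc part =>
      if pvIsTemporal (PySem.Str.lower (PySem.Str.strip part)) then acc
      else acc ++ [PySem.Str.strip part]) []
    PySem.Str.join "." parts

-- ===== PORT B =====
-- one iteration of the enumerate loop collecting top-level dot positions; state = (cuts, depth)
def pvCutStep (st : List Int × Int) (p : Int × Char) : List Int × Int :=
  if p.2 = '(' then (st.1, st.2 + 1)
  else if p.2 = ')' then (st.1, st.2 - 1)
  else if p.2 = '.' ∧ st.2 = 0 then (st.1 ++ [p.1], st.2)
  else (st.1, st.2)

-- one iteration of the  for a, b in zip(cuts, cuts[1:])  loop: slice, skip empty, strip, filter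
def pvKeepStep (cs : List Char) (kept : List String) (p : Int × Int) : List String :=
  let seg := PySem.List.slice cs (some (p.1 + 1)) (some p.2)
  if seg = [] then kept
  else
    let t := String.ofList (PySem.Chars.strip seg)
    if pvIsTemporal (PySem.Str.lower t) then kept else kept ++ [t]

def context_key_alt (slice_dsl : String) : String :=
  if slice_dsl.toList = [] then "" else
    let cs := slice_dsl.toList
    let st := (PySem.List.enumerate cs).foldl pvCutStep ([-1], 0)
    let cuts := st.1 ++ [(cs.length : Int)]
    PySem.Str.join "." ((cuts.zip cuts.tail).foldl (pvKeepStep cs) [])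

-- ===== PRECONDITION & SPEC =====
def Spec_context_key (slice_dsl : String) (out : String) : Prop := out = context_key_alt slice_dsl
instance (slice_dsl : String) (out : String) : Decidable (Spec_context_key slice_dsl out) := by unfold Spec_context_key; infer_instance

-- ===== CLAIM (what is proved, stated in full; the proofs are below) =====
def Claim_equal_context_key : Prop := ∀ (slice_dsl : String), Dom_context_key slice_dsl → Spec_context_key slice_dsl (context_key slice_dsl)

-- ===== LEMMAS AND PROOFS =====

-- the segments of a DSL string: split at top-level dots (common spec for both ports)
def pvConsHead (c : Char) : List (List Char) → List (List Char)
  | [] => [[c]]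
  | s :: ss => (c :: s) :: ss

def pvSegs : Int → List Char → List (List Char)
  | _, [] => [[]]
  | d, c :: r =>
    if c = '(' then pvConsHead c (pvSegs (d + 1) r)
    else if c = ')' then pvConsHead c (pvSegs (d - 1) r)
    else if c = '.' ∧ d = 0 then [] :: pvSegs d r
    else pvConsHead c (pvSegs d r)

-- what one segment contributes to the final list of parts
def pvKeep (seg : List Char) : List String :=
  if seg = [] then [] else
    let t := String.ofList (PySem.Chars.strip seg)
    if pvIsTemporal (PySem.Str.lower t) then [] else [t]

def pvGlue (cur : List Char) : List (List Char) → List (List Char)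
  | [] => [cur]
  | s :: ss => (cur ++ s) :: ss

def pvFinalize (st : List String × Int × List Char) : List String :=
  if st.2.2 ≠ [] then st.1 ++ [String.ofList st.2.2] else st.1

def pvMk? (seg : List Char) : Option String :=
  if seg = [] then none else some (String.ofList seg)

-- relative positions of the top-level dots
def pvDots : List Char → Int → List Nat
  | [], _ => []
  | c :: r, d =>
    if c = '(' then (pvDots r (d + 1)).map (· + 1)
    else if c = ')' then (pvDots r (d - 1)).map (· + 1)
    else if c = '.' ∧ d = 0 then 0 :: (pvDots r d).map (· + 1)
    else (pvDots r d).map (· + 1)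

-- segments cut out of cs between consecutive dot positions, starting at start
def pvSegsOf (cs : List Char) : Nat → List Nat → List (List Char)
  | start, [] => [cs.drop start]
  | start, j :: js => (cs.drop start).take (j - start) :: pvSegsOf cs (j + 1) js

lemma pv_strip_ofList (l : List Char) :
    PySem.Str.strip (String.ofList l) = String.ofList (PySem.Chars.strip l) := by
  apply String.toList_inj.mp; simp

lemma pvConsHead_ne_nil (c : Char) (ss : List (List Char)) : pvConsHead c ss ≠ [] := by
  cases ss <;> simp [pvConsHead]

lemma pvSegs_ne_nil (d : Int) (cs : List Char) : pvSegs d cs ≠ [] := by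
  cases cs with
  | nil => simp [pvSegs]
  | cons c r => simp only [pvSegs]; split_ifs <;> first | exact pvConsHead_ne_nil _ _ | simp

lemma pvGlue_consHead (cur : List Char) (c : Char) (ss : List (List Char)) (h : ss ≠ []) :
    pvGlue cur (pvConsHead c ss) = pvGlue (cur ++ [c]) ss := by
  cases ss with
  | nil => exact absurd rfl h
  | cons s t => simp [pvGlue, pvConsHead]

lemma pvGlue_nil (ss : List (List Char)) (h : ss ≠ []) : pvGlue [] ss = ss := by
  cases ss with
  | nil => exact absurd rfl h
  | cons s t => simp [pvGlue]

-- A's split loop computes the nonempty segments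
lemma pvA_split (rest : List Char) : ∀ (d : Int) (parts : List String) (cur : List Char),
    pvFinalize (rest.foldl pvSplitStep (parts, d, cur)) =
      parts ++ (pvGlue cur (pvSegs d rest)).filterMap pvMk? := by
  induction rest with
  | nil =>
    intro d parts cur
    by_cases h : cur = [] <;> simp [pvFinalize, pvGlue, pvSegs, pvMk?, h]
  | cons c r ih =>
    intro d parts cur
    simp only [List.foldl_cons, pvSplitStep]
    by_cases h1 : c = '('
    · simp only [if_pos h1]
      rw [ih, show pvSegs d (c :: r) = pvConsHead c (pvSegs (d + 1) r) by simp [pvSegs, h1],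
        pvGlue_consHead _ _ _ (pvSegs_ne_nil _ _)]
    · by_cases h2 : c = ')'
      · simp only [if_neg h1, if_pos h2]
        rw [ih, show pvSegs d (c :: r) = pvConsHead c (pvSegs (d - 1) r) by simp [pvSegs, h2],
          pvGlue_consHead _ _ _ (pvSegs_ne_nil _ _)]
      · by_cases h3 : c = '.' ∧ d = 0
        · simp only [if_neg h1, if_neg h2, if_pos h3]
          rw [ih, show pvSegs d (c :: r) = [] :: pvSegs d r by
              simp [pvSegs, h3.1, h3.2]]
          rw [pvGlue_nil _ (pvSegs_ne_nil _ _)]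
          by_cases h : cur = [] <;>
            simp [h, pvGlue, pvMk?, List.append_assoc]
        · simp only [if_neg h1, if_neg h2, if_neg h3]
          rw [ih, show pvSegs d (c :: r) = pvConsHead c (pvSegs d r) by
              simp [pvSegs, h1, h2, h3],
            pvGlue_consHead _ _ _ (pvSegs_ne_nil _ _)]

-- A's filter loop over the parts = flatMap pvKeep over the segments
lemma pvA_filter (ss : List (List Char)) : ∀ (acc : List String),
    (ss.filterMap pvMk?).foldl (fun acc part =>
        if pvIsTemporal (PySem.Str.lower (PySem.Str.strip part)) then acc
        else acc ++ [PySem.Str.strip part]) acc =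
      acc ++ ss.flatMap pvKeep := by
  induction ss with
  | nil => intro acc; simp
  | cons seg t ih =>
    intro acc
    by_cases h : seg = []
    · rw [show List.filterMap pvMk? (seg :: t) = List.filterMap pvMk? t by simp [pvMk?, h], ih]
      simp [List.flatMap_cons, pvKeep, h]
    · rw [show List.filterMap pvMk? (seg :: t) = String.ofList seg :: List.filterMap pvMk? t by
        simp [pvMk?, h]]
      simp only [List.foldl_cons, pv_strip_ofList]
      by_cases ht : pvIsTemporal (PySem.Str.lower (String.ofList (PySem.Chars.strip seg))) = true
      · rw [if_pos ht, ih]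
        simp [List.flatMap_cons, pvKeep, h, ht]
      · rw [if_neg ht, ih]
        simp [List.flatMap_cons, pvKeep, h, ht, List.append_assoc]

-- characterization of A
lemma pvA_char (s : String) :
    context_key s = if s.toList = [] then "" else
      PySem.Str.join "." ((pvSegs 0 s.toList).flatMap pvKeep) := by
  by_cases h : s.toList = []
  · simp [context_key, h]
  · simp only [context_key, if_neg h]
    have hsplit : pvSplitDslParts s = (pvSegs 0 s.toList).filterMap pvMk? := by
      have := pvA_split s.toList 0 [] []
      simpa [pvSplitDslParts, pvFinalize, pvGlue_nil _ (pvSegs_ne_nil 0 s.toList)] using this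
    rw [hsplit, pvA_filter]
    simp

-- shifting the enumerate offset by one
lemma pv_shift_map (i : Int) (l : List Nat) :
    l.map (fun (j : Nat) => (i + 1) + (j : Int)) =
      (l.map (fun (j : Nat) => j + 1)).map (fun (j : Nat) => i + (j : Int)) := by
  induction l with
  | nil => simp
  | cons x xs ih =>
    simp only [List.map_cons, ih]
    congr 1
    push_cast
    ring

-- B's cut loop collects the (shifted) top-level dot positions
lemma pvB_cuts (rest : List Char) : ∀ (i : Int) (acc : List Int) (d : Int),
    ((PySem.List.enumerate rest i).foldl pvCutStep (acc, d)).1 =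
      acc ++ (pvDots rest d).map (fun (j : Nat) => i + (j : Int)) := by
  induction rest with
  | nil => intro i acc d; simp [PySem.List.enumerate, pvDots]
  | cons c r ih =>
    intro i acc d
    rw [show PySem.List.enumerate (c :: r) i = (i, c) :: PySem.List.enumerate r (i + 1) by
      simp [PySem.List.enumerate]]
    simp only [List.foldl_cons, pvCutStep]
    by_cases h1 : c = '('
    · rw [if_pos h1, ih, show pvDots (c :: r) d = (pvDots r (d + 1)).map (· + 1) by
        simp [pvDots, h1], ← pv_shift_map]
    · by_cases h2 : c = ')'
      · rw [if_neg h1, if_pos h2, ih, show pvDots (c :: r) d = (pvDots r (d - 1)).map (· + 1) by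
          simp [pvDots, h2], ← pv_shift_map]
      · by_cases h3 : c = '.' ∧ d = 0
        · rw [if_neg h1, if_neg h2, if_pos h3, ih,
            show pvDots (c :: r) d = 0 :: (pvDots r d).map (· + 1) by
              simp [pvDots, h3.1, h3.2], List.map_cons, ← pv_shift_map]
          simp
        · rw [if_neg h1, if_neg h2, if_neg h3, ih,
            show pvDots (c :: r) d = (pvDots r d).map (· + 1) by simp [pvDots, h1, h2, h3],
            ← pv_shift_map]

-- slicing between consecutive cut points = pvSegsOf
lemma pvB_slices (cs : List Char) : ∀ (ds : List Nat) (a : Int) (start : Nat),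
    a + 1 = (start : Int) →
    (((a :: (ds.map (Nat.cast) ++ [(cs.length : Int)])).zip
        (ds.map (Nat.cast) ++ [(cs.length : Int)])).map
      (fun p => PySem.List.slice cs (some (p.1 + 1)) (some p.2)) =
      pvSegsOf cs start ds) := by
  intro ds
  induction ds with
  | nil =>
    intro a start h
    simp only [List.map_nil, List.nil_append, List.zip_cons_cons, List.zip_nil_right,
      List.map_cons, List.map_nil, pvSegsOf]
    rw [h, show ((start : Int)) = ((start : Nat) : Int) from rfl, PySem.List.slice_natCast]
    congr 1
    exact List.take_of_length_le (by simp)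
  | cons j js ih =>
    intro a start h
    simp only [List.map_cons, List.cons_append, List.zip_cons_cons, List.map_cons, pvSegsOf]
    congr 1
    · rw [h, show ((start : Int)) = ((start : Nat) : Int) from rfl]
      exact PySem.List.slice_natCast cs start j
    · exact ih (j : Int) (j + 1) (by push_cast; ring)

-- pvSegsOf shifts
lemma pvSegsOf_shift (c : Char) (cs : List Char) : ∀ (ds : List Nat) (start : Nat),
    pvSegsOf (c :: cs) (start + 1) (ds.map (· + 1)) = pvSegsOf cs start ds := by
  intro ds
  induction ds with
  | nil => intro start; simp [pvSegsOf]
  | cons j js ih =>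
    intro start
    simp only [List.map_cons, pvSegsOf, List.drop_succ_cons]
    rw [show j + 1 - (start + 1) = j - start by omega, ih]

lemma pvSegsOf_cons (c : Char) (cs : List Char) (ds : List Nat) :
    pvSegsOf (c :: cs) 0 (ds.map (· + 1)) = pvConsHead c (pvSegsOf cs 0 ds) := by
  cases ds with
  | nil => simp [pvSegsOf, pvConsHead]
  | cons j js =>
    simp only [List.map_cons, pvSegsOf, List.drop_zero, Nat.sub_zero, List.take_succ_cons,
      pvConsHead]
    rw [show j + 1 + 1 = (j + 1) + 1 from rfl, pvSegsOf_shift]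

-- the segments cut at the dot positions ARE pvSegs
lemma pvSegsOf_dots (cs : List Char) : ∀ (d : Int),
    pvSegsOf cs 0 (pvDots cs d) = pvSegs d cs := by
  induction cs with
  | nil => intro d; simp [pvDots, pvSegsOf, pvSegs]
  | cons c r ih =>
    intro d
    by_cases h1 : c = '('
    · simp only [pvDots, pvSegs, if_pos h1]
      rw [pvSegsOf_cons, ih]
    · by_cases h2 : c = ')'
      · simp only [pvDots, pvSegs, if_neg h1, if_pos h2]
        rw [pvSegsOf_cons, ih]
      · by_cases h3 : c = '.' ∧ d = 0
        · simp only [pvDots, pvSegs, if_neg h1, if_neg h2, if_pos h3]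
          simp only [pvSegsOf, List.drop_zero, Nat.sub_self, List.take_zero]
          rw [show (0:Nat) + 1 = 0 + 1 from rfl, pvSegsOf_shift, ih]
        · simp only [pvDots, pvSegs, if_neg h1, if_neg h2, if_neg h3]
          rw [pvSegsOf_cons, ih]

-- B's keep loop = flatMap pvKeep over the slices
lemma pvB_keep (cs : List Char) (pairs : List (Int × Int)) : ∀ (kept : List String),
    pairs.foldl (pvKeepStep cs) kept =
      kept ++ (pairs.map (fun p => PySem.List.slice cs (some (p.1 + 1)) (some p.2))).flatMap pvKeep := by
  induction pairs with
  | nil => intro kept; simp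
  | cons p t ih =>
    intro kept
    simp only [List.foldl_cons, List.map_cons, List.flatMap_cons]
    have hstep : pvKeepStep cs kept p =
        kept ++ pvKeep (PySem.List.slice cs (some (p.1 + 1)) (some p.2)) := by
      simp only [pvKeepStep, pvKeep]
      split_ifs <;> simp
    rw [hstep, ih, List.append_assoc]

-- ===== VERDICT (by name: the statement is the Claim_ definition above) =====
theorem context_key_spec : Claim_equal_context_key := by
  intro s _
  unfold Spec_context_key
  rw [pvA_char]
  by_cases h : s.toList = []
  · simp [context_key_alt, h]
  · simp only [context_key_alt, if_neg h]
    rw [pvB_cuts s.toList 0 [-1] 0]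
    have hcuts : ([-1] ++ (pvDots s.toList 0).map (fun (j : Nat) => 0 + (j : Int))) ++ [(s.toList.length : Int)]
        = (-1) :: ((pvDots s.toList 0).map Nat.cast ++ [(s.toList.length : Int)]) := by
      simp
    rw [hcuts]
    rw [show ((-1) :: ((pvDots s.toList 0).map Nat.cast ++ [(s.toList.length : Int)])).tail
        = (pvDots s.toList 0).map Nat.cast ++ [(s.toList.length : Int)] from rfl]
    rw [pvB_keep]
    rw [pvB_slices s.toList (pvDots s.toList 0) (-1) 0 (by simp)]
    rw [pvSegsOf_dots]
    simp
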